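-- pv_equiv track=rewrite | github.com/zhangxiuwen040831/airc-skill | airc_skill/pipeline.py | _missing_required_actions
-- ===== SOURCE A (Python) =====
-- def _missing_required_actions(
--     required_structural_actions: list[str],
--     structural_actions: list[str],
--     required_discourse_actions: list[str],
--     discourse_actions: list[str],
--     required_minimum_sentence_level_changes: int,
--     sentence_level_changes: int,
--     required_minimum_cluster_changes: int,
--     cluster_changes: int,
-- ) -> list[str]:
--     missing: list[str] = []
--     structural_set = set(structural_actions)
--     discourse_set = set(discourse_actions)
--     for action in required_structural_actions:
--         allowed = _required_action_aliases(action)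
--         if structural_set.isdisjoint(allowed):
--             missing.append(action)
--     for action in required_discourse_actions:
--         allowed = _required_action_aliases(action)
--         if discourse_set.isdisjoint(allowed):
--             missing.append(action)
--     if sentence_level_changes < required_minimum_sentence_level_changes:
--         missing.append(f"sentence_level_change>={required_minimum_sentence_level_changes}")
--     if cluster_changes < required_minimum_cluster_changes:
--         missing.append(f"cluster_change>={required_minimum_cluster_changes}")
--     return missing
--
-- def _required_action_aliases(action: str) -> set[str]:
--     aliases = {
--         "pair_fusion": {"pair_fusion", "sentence_merge", "clause_reorder"},
--         "sentence_cluster_merge": {"sentence_cluster_merge", "sentence_cluster_rewrite", "pair_fusion", "sentence_merge"},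
--         "sentence_cluster_split": {"sentence_cluster_split", "sentence_split", "rebuild_sentence_rhythm"},
--         "discourse_reordering": {"discourse_reordering", "proposition_reorder", "paragraph_reorder"},
--         "narrative_path_rewrite": {"narrative_path_rewrite", "proposition_reorder", "paragraph_reorder"},
--         "conclusion_absorption": {"conclusion_absorption", "conclusion_absorb", "followup_absorb"},
--         "uneven_rewrite_distribution": {"uneven_rewrite_distribution", "partial_keep"},
--         "conclusion_absorb": {"conclusion_absorb", "conclusion_absorption", "followup_absorb"},
--         "subject_chain_compression": {
--             "subject_chain_compression",
--             "compress_subject_chain",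
--             "merge_consecutive_subject_sentences",
--             "subject_drop",
--             "subject_variation",
--             "meta_compression",
--             "followup_absorb",
--         },
--         "enumeration_reframe": {"enumeration_reframe"},
--         "clause_reorder": {"clause_reorder", "pair_fusion", "sentence_merge"},
--         "sentence_cluster_rewrite": {"sentence_cluster_rewrite", "sentence_cluster_merge", "pair_fusion", "conclusion_absorb", "sentence_merge"},
--         "meta_compression": {"meta_compression", "subject_chain_compression"},
--         "proposition_reorder": {"proposition_reorder", "paragraph_reorder"},
--         "transition_absorption": {"transition_absorption", "pair_fusion", "sentence_cluster_rewrite"},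
--         "rationale_expansion": {"rationale_expansion", "clause_reorder"},
--         "reduce_function_word_overuse": {"reduce_function_word_overuse"},
--         "weaken_template_connectors": {"weaken_template_connectors", "transition_absorption"},
--         "compress_subject_chain": {"compress_subject_chain", "subject_chain_compression"},
--         "rebuild_sentence_rhythm": {"rebuild_sentence_rhythm", "sentence_split", "sentence_merge"},
--         "break_parallelism": {"break_parallelism", "clause_reorder"},
--         "rewrite_dense_nominal_phrases": {"rewrite_dense_nominal_phrases"},
--         "preserve_explicit_subject_if_clarity_needed": {"preserve_explicit_subject_if_clarity_needed"},
--         "keep_original_if_technical_density_is_high": {"keep_original_if_technical_density_is_high"},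
--     }
--     return aliases.get(action, {action})
-- ===== SOURCE B (Python) =====
-- _ALIASES = {
--     "pair_fusion": ["pair_fusion", "sentence_merge", "clause_reorder"],
--     "sentence_cluster_merge": ["sentence_cluster_merge", "sentence_cluster_rewrite", "pair_fusion", "sentence_merge"],
--     "sentence_cluster_split": ["sentence_cluster_split", "sentence_split", "rebuild_sentence_rhythm"],
--     "discourse_reordering": ["discourse_reordering", "proposition_reorder", "paragraph_reorder"],
--     "narrative_path_rewrite": ["narrative_path_rewrite", "proposition_reorder", "paragraph_reorder"],
--     "conclusion_absorption": ["conclusion_absorption", "conclusion_absorb", "followup_absorb"],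
--     "uneven_rewrite_distribution": ["uneven_rewrite_distribution", "partial_keep"],
--     "conclusion_absorb": ["conclusion_absorb", "conclusion_absorption", "followup_absorb"],
--     "subject_chain_compression": [
--         "subject_chain_compression",
--         "compress_subject_chain",
--         "merge_consecutive_subject_sentences",
--         "subject_drop",
--         "subject_variation",
--         "meta_compression",
--         "followup_absorb",
--     ],
--     "enumeration_reframe": ["enumeration_reframe"],
--     "clause_reorder": ["clause_reorder", "pair_fusion", "sentence_merge"],
--     "sentence_cluster_rewrite": ["sentence_cluster_rewrite", "sentence_cluster_merge", "pair_fusion", "conclusion_absorb", "sentence_merge"],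
--     "meta_compression": ["meta_compression", "subject_chain_compression"],
--     "proposition_reorder": ["proposition_reorder", "paragraph_reorder"],
--     "transition_absorption": ["transition_absorption", "pair_fusion", "sentence_cluster_rewrite"],
--     "rationale_expansion": ["rationale_expansion", "clause_reorder"],
--     "reduce_function_word_overuse": ["reduce_function_word_overuse"],
--     "weaken_template_connectors": ["weaken_template_connectors", "transition_absorption"],
--     "compress_subject_chain": ["compress_subject_chain", "subject_chain_compression"],
--     "rebuild_sentence_rhythm": ["rebuild_sentence_rhythm", "sentence_split", "sentence_merge"],
--     "break_parallelism": ["break_parallelism", "clause_reorder"],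
--     "rewrite_dense_nominal_phrases": ["rewrite_dense_nominal_phrases"],
--     "preserve_explicit_subject_if_clarity_needed": ["preserve_explicit_subject_if_clarity_needed"],
--     "keep_original_if_technical_density_is_high": ["keep_original_if_technical_density_is_high"],
-- }
--
-- # Reverse alias index, built once: _REVERSE[p] = set of required-action keys that
-- # a provided action p satisfies.
-- _REVERSE: dict = {}
-- for _key, _vals in _ALIASES.items():
--     for _v in _vals:
--         _REVERSE.setdefault(_v, set()).add(_key)
--
--
-- def _covered(provided: list) -> set:
--     covered: set = set()
--     for p in provided:
--         covered |= _REVERSE.get(p, set())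
--         covered.add(p)
--     return covered
--
--
-- def _missing_required_actions(
--     required_structural_actions,
--     structural_actions,
--     required_discourse_actions,
--     discourse_actions,
--     required_minimum_sentence_level_changes,
--     sentence_level_changes,
--     required_minimum_cluster_changes,
--     cluster_changes,
-- ):
--     covered_structural = _covered(structural_actions)
--     covered_discourse = _covered(discourse_actions)
--     missing = [a for a in required_structural_actions if a not in covered_structural]
--     missing += [a for a in required_discourse_actions if a not in covered_discourse]
--     if sentence_level_changes < required_minimum_sentence_level_changes:
--         missing.append(f"sentence_level_change>={required_minimum_sentence_level_changes}")
--     if cluster_changes < required_minimum_cluster_changes: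
--         missing.append(f"cluster_change>={required_minimum_cluster_changes}")
--     return missing
-- ===== Notes on version B (the rewrite author's own statement) =====
-- stated objective: faster
-- what changed: B inverts the data flow: instead of rebuilding the alias table and computing each required action's alias set per required action and testing set-disjointness against the provided-action set, it builds a static reverse alias index once at module load, folds the provided actions into a single covered-set of satisfied required actions, and then filters the required lists by plain membership.
import Mathlib
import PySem

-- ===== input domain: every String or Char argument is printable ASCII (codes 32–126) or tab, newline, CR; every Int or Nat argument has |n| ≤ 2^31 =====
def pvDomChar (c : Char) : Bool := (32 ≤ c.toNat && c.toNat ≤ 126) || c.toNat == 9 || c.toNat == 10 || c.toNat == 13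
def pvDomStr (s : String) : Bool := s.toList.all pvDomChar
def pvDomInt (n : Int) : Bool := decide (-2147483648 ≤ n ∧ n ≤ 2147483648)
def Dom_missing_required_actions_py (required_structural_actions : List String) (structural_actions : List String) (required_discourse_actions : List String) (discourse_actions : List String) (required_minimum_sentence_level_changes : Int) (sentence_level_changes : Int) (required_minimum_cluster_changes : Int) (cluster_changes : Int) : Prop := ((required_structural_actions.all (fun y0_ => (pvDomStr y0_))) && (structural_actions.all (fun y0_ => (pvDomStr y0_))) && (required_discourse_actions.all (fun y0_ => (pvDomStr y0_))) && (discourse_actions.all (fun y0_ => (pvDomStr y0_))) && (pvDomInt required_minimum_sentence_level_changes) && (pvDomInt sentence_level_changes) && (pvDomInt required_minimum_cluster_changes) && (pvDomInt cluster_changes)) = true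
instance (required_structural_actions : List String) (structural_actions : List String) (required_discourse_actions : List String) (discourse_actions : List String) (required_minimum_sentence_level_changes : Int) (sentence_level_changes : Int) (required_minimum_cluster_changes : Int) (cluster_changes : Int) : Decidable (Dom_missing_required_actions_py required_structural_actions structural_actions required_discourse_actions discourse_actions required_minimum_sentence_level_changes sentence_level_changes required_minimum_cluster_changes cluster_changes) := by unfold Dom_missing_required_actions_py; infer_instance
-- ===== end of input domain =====

-- B replaces A's per-required-action alias-table rebuild + set-disjointness test with a
-- reverse alias index built once, folding the provided actions into one covered-set and
-- filtering the required actions by membership (objective: faster, measured).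

-- ===== PORT A =====
-- the static alias table of _required_action_aliases (set literals as distinct-element lists)
def pvAliasTable : List (String × List String) := [
  ("pair_fusion", ["pair_fusion", "sentence_merge", "clause_reorder"]),
  ("sentence_cluster_merge", ["sentence_cluster_merge", "sentence_cluster_rewrite", "pair_fusion", "sentence_merge"]),
  ("sentence_cluster_split", ["sentence_cluster_split", "sentence_split", "rebuild_sentence_rhythm"]),
  ("discourse_reordering", ["discourse_reordering", "proposition_reorder", "paragraph_reorder"]),
  ("narrative_path_rewrite", ["narrative_path_rewrite", "proposition_reorder", "paragraph_reorder"]),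
  ("conclusion_absorption", ["conclusion_absorption", "conclusion_absorb", "followup_absorb"]),
  ("uneven_rewrite_distribution", ["uneven_rewrite_distribution", "partial_keep"]),
  ("conclusion_absorb", ["conclusion_absorb", "conclusion_absorption", "followup_absorb"]),
  ("subject_chain_compression", ["subject_chain_compression", "compress_subject_chain", "merge_consecutive_subject_sentences", "subject_drop", "subject_variation", "meta_compression", "followup_absorb"]),
  ("enumeration_reframe", ["enumeration_reframe"]),
  ("clause_reorder", ["clause_reorder", "pair_fusion", "sentence_merge"]),
  ("sentence_cluster_rewrite", ["sentence_cluster_rewrite", "sentence_cluster_merge", "pair_fusion", "conclusion_absorb", "sentence_merge"]),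
  ("meta_compression", ["meta_compression", "subject_chain_compression"]),
  ("proposition_reorder", ["proposition_reorder", "paragraph_reorder"]),
  ("transition_absorption", ["transition_absorption", "pair_fusion", "sentence_cluster_rewrite"]),
  ("rationale_expansion", ["rationale_expansion", "clause_reorder"]),
  ("reduce_function_word_overuse", ["reduce_function_word_overuse"]),
  ("weaken_template_connectors", ["weaken_template_connectors", "transition_absorption"]),
  ("compress_subject_chain", ["compress_subject_chain", "subject_chain_compression"]),
  ("rebuild_sentence_rhythm", ["rebuild_sentence_rhythm", "sentence_split", "sentence_merge"]),
  ("break_parallelism", ["break_parallelism", "clause_reorder"]),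
  ("rewrite_dense_nominal_phrases", ["rewrite_dense_nominal_phrases"]),
  ("preserve_explicit_subject_if_clarity_needed", ["preserve_explicit_subject_if_clarity_needed"]),
  ("keep_original_if_technical_density_is_high", ["keep_original_if_technical_density_is_high"])]

-- _required_action_aliases: aliases.get(action, {action})
def pvRequiredActionAliases (action : String) : PySem.Set String :=
  (PySem.Dict.mk pvAliasTable).getD action [action]

def missing_required_actions_py (required_structural_actions : List String) (structural_actions : List String) (required_discourse_actions : List String) (discourse_actions : List String) (required_minimum_sentence_level_changes : Int) (sentence_level_changes : Int) (required_minimum_cluster_changes : Int) (cluster_changes : Int) : List String :=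
  let structural_set : PySem.Set String := PySem.Set.ofList structural_actions
  let discourse_set : PySem.Set String := PySem.Set.ofList discourse_actions
  let missing : List String := required_structural_actions.foldl (fun missing action =>
    if PySem.Set.isdisjoint structural_set (pvRequiredActionAliases action) then missing ++ [action] else missing) []
  let missing : List String := required_discourse_actions.foldl (fun missing action =>
    if PySem.Set.isdisjoint discourse_set (pvRequiredActionAliases action) then missing ++ [action] else missing) missing
  let missing : List String := if sentence_level_changes < required_minimum_sentence_level_changes then
    missing ++ ["sentence_level_change>=" ++ PySem.Int.toStr required_minimum_sentence_level_changes] else missing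
  if cluster_changes < required_minimum_cluster_changes then
    missing ++ ["cluster_change>=" ++ PySem.Int.toStr required_minimum_cluster_changes] else missing

-- ===== PORT B =====
-- _REVERSE: reverse alias index, built once from the table
def pvReverse : PySem.Dict String (PySem.Set String) :=
  pvAliasTable.foldl (fun d kv =>
    kv.2.foldl (fun d v => d.insert v (PySem.Set.add (d.getD v PySem.Set.empty) kv.1)) d) PySem.Dict.empty

-- _covered(provided)
def pvCovered (provided : List String) : PySem.Set String :=
  provided.foldl (fun covered p =>
    PySem.Set.add (PySem.Set.update covered (pvReverse.getD p PySem.Set.empty)) p) PySem.Set.empty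

def missing_required_actions_py_alt (required_structural_actions : List String) (structural_actions : List String) (required_discourse_actions : List String) (discourse_actions : List String) (required_minimum_sentence_level_changes : Int) (sentence_level_changes : Int) (required_minimum_cluster_changes : Int) (cluster_changes : Int) : List String :=
  let covered_structural := pvCovered structural_actions
  let covered_discourse := pvCovered discourse_actions
  let missing : List String := required_structural_actions.filter (fun a => !(PySem.Set.contains covered_structural a))
  let missing : List String := missing ++ required_discourse_actions.filter (fun a => !(PySem.Set.contains covered_discourse a))
  let missing : List String := if sentence_level_changes < required_minimum_sentence_level_changes then
    missing ++ ["sentence_level_change>=" ++ PySem.Int.toStr required_minimum_sentence_level_changes] else missing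
  if cluster_changes < required_minimum_cluster_changes then
    missing ++ ["cluster_change>=" ++ PySem.Int.toStr required_minimum_cluster_changes] else missing

-- ===== PRECONDITION & SPEC =====
def Spec_missing_required_actions_py (required_structural_actions : List String) (structural_actions : List String) (required_discourse_actions : List String) (discourse_actions : List String) (required_minimum_sentence_level_changes : Int) (sentence_level_changes : Int) (required_minimum_cluster_changes : Int) (cluster_changes : Int) (out : List String) : Prop := out = missing_required_actions_py_alt required_structural_actions structural_actions required_discourse_actions discourse_actions required_minimum_sentence_level_changes sentence_level_changes required_minimum_cluster_changes cluster_changes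
instance (required_structural_actions : List String) (structural_actions : List String) (required_discourse_actions : List String) (discourse_actions : List String) (required_minimum_sentence_level_changes : Int) (sentence_level_changes : Int) (required_minimum_cluster_changes : Int) (cluster_changes : Int) (out : List String) : Decidable (Spec_missing_required_actions_py required_structural_actions structural_actions required_discourse_actions discourse_actions required_minimum_sentence_level_changes sentence_level_changes required_minimum_cluster_changes cluster_changes out) := by unfold Spec_missing_required_actions_py; infer_instance

-- ===== CLAIM =====
def Claim_equal_missing_required_actions_py : Prop := ∀ (required_structural_actions : List String) (structural_actions : List String) (required_discourse_actions : List String) (discourse_actions : List String) (required_minimum_sentence_level_changes : Int) (sentence_level_changes : Int) (required_minimum_cluster_changes : Int) (cluster_changes : Int), Dom_missing_required_actions_py required_structural_actions structural_actions required_discourse_actions discourse_actions required_minimum_sentence_level_changes sentence_level_changes required_minimum_cluster_changes cluster_changes → Spec_missing_required_actions_py required_structural_actions structural_actions required_discourse_actions discourse_actions required_minimum_sentence_level_changes sentence_level_changes required_minimum_cluster_changes cluster_changes (missing_required_actions_py required_structural_actions structural_actions required_discourse_actions discourse_actions required_minimum_sentence_level_changes sentence_level_changes required_minimum_cluster_changes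 cluster_changes)

-- ===== LEMMAS AND PROOFS =====

-- the reverse index, evaluated to a literal once
def pvReverseLit : PySem.Dict String (PySem.Set String) := PySem.Dict.mk [("pair_fusion", ["pair_fusion", "sentence_cluster_merge", "clause_reorder", "sentence_cluster_rewrite", "transition_absorption"]), ("sentence_merge", ["pair_fusion", "sentence_cluster_merge", "clause_reorder", "sentence_cluster_rewrite", "rebuild_sentence_rhythm"]), ("clause_reorder", ["pair_fusion", "clause_reorder", "rationale_expansion", "break_parallelism"]), ("sentence_cluster_merge", ["sentence_cluster_merge", "sentence_cluster_rewrite"]), ("sentence_cluster_rewrite", ["sentence_cluster_merge", "sentence_cluster_rewrite", "transition_absorption"]), ("sentence_cluster_split", ["sentence_cluster_split"]), ("sentence_split", ["sentence_cluster_split", "rebuild_sentence_rhythm"]), ("rebuild_sentence_rhythm", ["sentence_cluster_split", "rebuild_sentence_rhythm"]), ("discourse_reordering", ["discourse_reordering"]), ("proposition_reorder", ["discourse_reordering", "narrative_path_rewrite", "proposition_reorder"]), ("paragraph_reorder", ["discourse_reordering", "narrative_path_rewrite", "proposition_reorder"]), ("narrative_path_rewrite", ["narrative_path_rewrite"]),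 ("conclusion_absorption", ["conclusion_absorption", "conclusion_absorb"]), ("conclusion_absorb", ["conclusion_absorption", "conclusion_absorb", "sentence_cluster_rewrite"]), ("followup_absorb", ["conclusion_absorption", "conclusion_absorb", "subject_chain_compression"]), ("uneven_rewrite_distribution", ["uneven_rewrite_distribution"]), ("partial_keep", ["uneven_rewrite_distribution"]), ("subject_chain_compression", ["subject_chain_compression", "meta_compression", "compress_subject_chain"]), ("compress_subject_chain", ["subject_chain_compression", "compress_subject_chain"]), ("merge_consecutive_subject_sentences", ["subject_chain_compression"]), ("subject_drop", ["subject_chain_compression"]), ("subject_variation", ["subject_chain_compression"]), ("meta_compression", ["subject_chain_compression", "meta_compression"]), ("enumeration_reframe", ["enumeration_reframe"]), ("transition_absorption", ["transition_absorption", "weaken_template_connectors"]), ("rationale_expansion", ["rationale_expansion"]), ("reduce_function_word_overuse", ["reduce_function_word_overuse"]), ("weaken_template_connectors", ["weaken_template_connectors"]), ("break_parallelism", ["break_parallelism"]), ("rewrite_dense_nominal_phrases", ["rewrite_dense_nominal_phrases"]), ("preserve_explicit_subject_if_clarity_needed", ["preserve_explicit_subject_if_clarity_needed"]), ("keep_original_if_technical_density_is_high",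 ["keep_original_if_technical_density_is_high"])]

set_option maxRecDepth 40000 in
lemma pvReverse_eq : pvReverse = pvReverseLit := by decide

-- the table's key list
def pvKeys : List String := pvAliasTable.map Prod.fst

set_option maxRecDepth 40000 in
lemma pvD1 : ∀ a ∈ pvKeys, ∀ p ∈ pvReverse.keys,
    ((a ∈ pvReverse.getD p PySem.Set.empty ∨ a = p) ↔ p ∈ pvRequiredActionAliases a) := by
  simp only [pvReverse_eq]; decide

set_option maxRecDepth 40000 in
lemma pvD2 : ∀ p ∈ pvReverse.keys, ∀ a ∈ pvReverse.getD p PySem.Set.empty, a ∈ pvKeys := by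
  simp only [pvReverse_eq]; decide

set_option maxRecDepth 40000 in
lemma pvD3 : ∀ a ∈ pvKeys, ∀ p ∈ pvRequiredActionAliases a, p ∈ pvReverse.keys := by
  simp only [pvReverse_eq]; decide

set_option maxRecDepth 40000 in
lemma pvD4 : ∀ a ∈ pvKeys, a ∈ pvReverse.keys := by
  simp only [pvReverse_eq]; decide

lemma pvAliases_default {a : String} (ha : a ∉ pvKeys) : pvRequiredActionAliases a = [a] := by
  unfold pvRequiredActionAliases
  apply PySem.Dict.getD_of_not_contains
  rw [PySem.Dict.contains_eq_decide_mem_keys]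
  simpa [pvKeys] using ha

lemma pvGetD_outside {p : String} (hp : p ∉ pvReverse.keys) :
    pvReverse.getD p PySem.Set.empty = PySem.Set.empty := by
  apply PySem.Dict.getD_of_not_contains
  rw [PySem.Dict.contains_eq_decide_mem_keys]
  simpa using hp

-- the crux: one provided action p covers required action a (in B's sense)
-- exactly when p lies in a's alias set (A's sense)
lemma pvCover_iff (a p : String) :
    (a ∈ pvReverse.getD p PySem.Set.empty ∨ a = p) ↔ p ∈ pvRequiredActionAliases a := by
  by_cases hp : p ∈ pvReverse.keys
  · by_cases ha : a ∈ pvKeys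
    · exact pvD1 a ha p hp
    · rw [pvAliases_default ha]
      constructor
      · rintro (h | rfl)
        · exact absurd (pvD2 p hp a h) ha
        · simp
      · intro h; right; exact (List.mem_singleton.mp h).symm
  · rw [pvGetD_outside hp]
    by_cases ha : a ∈ pvKeys
    · constructor
      · rintro (h | rfl)
        · simp at h
        · exact absurd (pvD4 a ha) hp
      · intro h; exact absurd (pvD3 a ha p h) hp
    · rw [pvAliases_default ha]
      constructor
      · rintro (h | rfl)
        · simp at h
        · simp
      · intro h; right; exact (List.mem_singleton.mp h).symm

lemma pvMem_covered (provided : List String) (a : String) :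
    a ∈ pvCovered provided ↔ ∃ p ∈ provided, p ∈ pvRequiredActionAliases a := by
  unfold pvCovered
  suffices h : ∀ (c : PySem.Set String),
      a ∈ provided.foldl (fun covered p =>
        PySem.Set.add (PySem.Set.update covered (pvReverse.getD p PySem.Set.empty)) p) c ↔
      a ∈ c ∨ ∃ p ∈ provided, p ∈ pvRequiredActionAliases a by
    simpa using h PySem.Set.empty
  induction provided with
  | nil => simp
  | cons q l ih =>
    intro c
    simp only [List.foldl_cons, ih, PySem.Set.mem_add, PySem.Set.mem_update, List.mem_cons]
    have hq := pvCover_iff a q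
    constructor
    · rintro (((h | h) | h) | ⟨p, hp, h⟩)
      · exact Or.inl h
      · exact Or.inr ⟨q, Or.inl rfl, hq.mp (Or.inl h)⟩
      · exact Or.inr ⟨q, Or.inl rfl, hq.mp (Or.inr h)⟩
      · exact Or.inr ⟨p, Or.inr hp, h⟩
    · rintro (h | ⟨p, (rfl | hp), h⟩)
      · exact Or.inl (Or.inl (Or.inl h))
      · rcases hq.mpr h with h' | h'
        · exact Or.inl (Or.inl (Or.inr h'))
        · exact Or.inl (Or.inr h')
      · exact Or.inr ⟨p, hp, h⟩

-- A's per-action test equals the negation of B's membership test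
lemma pvTest_eq (provided : List String) (a : String) :
    PySem.Set.isdisjoint (PySem.Set.ofList provided) (pvRequiredActionAliases a)
      = !(PySem.Set.contains (pvCovered provided) a) := by
  have h2 : (PySem.Set.contains (pvCovered provided) a = true) ↔
      ∃ p ∈ provided, p ∈ pvRequiredActionAliases a := by
    rw [PySem.Set.contains_iff, pvMem_covered]
  rw [Bool.eq_iff_iff, Bool.not_eq_true', ← Bool.not_eq_true]
  rw [h2, PySem.Set.isdisjoint_iff]
  simp only [PySem.Set.mem_ofList]
  constructor
  · intro h ⟨p, hp, hpa⟩
    exact h p hp hpa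
  · intro h p hp hpa
    exact h ⟨p, hp, hpa⟩

-- ===== VERDICT =====
theorem missing_required_actions_py_spec : Claim_equal_missing_required_actions_py := by
  intro rs sa rd da rmsl slc rmc cc _
  show missing_required_actions_py rs sa rd da rmsl slc rmc cc
      = missing_required_actions_py_alt rs sa rd da rmsl slc rmc cc
  unfold missing_required_actions_py missing_required_actions_py_alt
  simp only [PySem.List.foldl_append_if_eq_filter, List.nil_append]
  have hs : ∀ (req prov : List String),
      req.filter (fun action => PySem.Set.isdisjoint (PySem.Set.ofList prov) (pvRequiredActionAliases action))
        = req.filter (fun a => !(PySem.Set.contains (pvCovered prov) a)) := by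
    intro req prov
    apply List.filter_congr
    intro a _
    rw [pvTest_eq]
  rw [hs rs sa, hs rd da]
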